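-- pv_equiv track=rewrite | github.com/kseungwoo/algorithm-problem-solving | programmers/2018 KAKAO BLIND RECRUITMENT/파일명 정렬.py | solution
-- ===== SOURCE A (Python) =====
-- from collections import defaultdict
--
-- def parse(s):
--     for i, c in enumerate(s):
--         if c.isdigit():
--             head, rest = s[:i], s[i:]
--             break
--     number, tail = "", ""
--     for i, c in enumerate(rest):
--         if i > 4 or not (c.isdigit()):
--             number, tail = rest[:i], rest[i:]
--             break
--     if len(number) == 0:
--         number = rest
--     return head, number, tail
--
-- def solution(files):
--     d = defaultdict(list)
--     # 문자열 파싱 후 저장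
--     for fn in files:
--         head, number, tail = parse(fn)
--         d[head.lower()].append((head, int(number), tail, fn))
--
--     answer = []
--     # HEAD 기준 정렬
--     for item in sorted(d.items()):
--         # NUMBER 기준 정렬
--         sorted_item = sorted(item[1], key=lambda x: x[1])
--         answer.extend([v[3] for v in sorted_item])
--     return answer
-- ===== SOURCE B (Python) =====
-- def solution(files):
--     decorated = []
--     for fn in files:
--         i = 0
--         while i < len(fn) and not fn[i].isdigit():
--             i += 1
--         j = i
--         while j < len(fn) and j - i < 5 and fn[j].isdigit():
--             j += 1
--         decorated.append((fn[:i].lower(), int(fn[i:j]), fn))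
--     decorated.sort(key=lambda t: (t[0], t[1]))
--     return [t[2] for t in decorated]
-- ===== Notes on version B (the rewrite author's own statement) =====
-- stated objective: alternative
-- what changed: B replaces A's defaultdict grouping by lowercased head, sort of the dict items and per-group number sort with a decorate-sort-undecorate pass: an inline index scanner extracts (head.lower(), int(number)) for each file, one stable sort orders the decorated triples, and the filenames are projected back out.
import Mathlib
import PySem

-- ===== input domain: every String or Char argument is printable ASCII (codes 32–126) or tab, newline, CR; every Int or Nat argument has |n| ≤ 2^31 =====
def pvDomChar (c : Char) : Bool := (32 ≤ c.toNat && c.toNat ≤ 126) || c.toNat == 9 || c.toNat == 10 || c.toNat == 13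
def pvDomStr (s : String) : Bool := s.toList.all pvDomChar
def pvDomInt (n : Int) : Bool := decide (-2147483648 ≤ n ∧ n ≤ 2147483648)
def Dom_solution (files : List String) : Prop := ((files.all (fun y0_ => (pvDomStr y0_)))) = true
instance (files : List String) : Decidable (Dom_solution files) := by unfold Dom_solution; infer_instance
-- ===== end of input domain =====

-- B replaces A's dict-grouping + sorted items + per-group number sort with a decorate-sort-undecorate
-- pass (inline index scanner for the key, ONE stable sort, then projection); same return value on Pre_.

-- ===== PORT A =====
-- second loop of parse: first index i of rest with i > 4 or not rest[i].isdigit(); none = no break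
def parseLoop2 : List Char → Nat → Option Nat
  | [], _ => none
  | c :: cs, i => if i > 4 || !(PySem.Chars.isdigit c) then some i else parseLoop2 cs (i + 1)

-- parse(s); none exactly where Python raises (no digit in s: `rest` unbound).
-- s[:i] / s[i:] with 0 ≤ i ≤ len(s) are exactly take/drop.
def parseChars (cs : List Char) : Option (List Char × List Char × List Char) :=
  match cs.findIdx? PySem.Chars.isdigit with
  | none => none
  | some i =>
    let head := cs.take i
    let rest := cs.drop i
    match parseLoop2 rest 0 with
    | none => some (head, rest, [])                -- no break: number = "" then number = rest, tail = ""
    | some j =>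
      let number := rest.take j
      let tail := rest.drop j
      if number = [] then some (head, rest, tail) else some (head, number, tail)

-- total wrapper for A's parse; the default is only reached outside Pre_solution, where parse raises.
def parseD (s : String) : String × String × String :=
  match parseChars s.toList with
  | some (h, n, t) => (String.ofList h, String.ofList n, String.ofList t)
  | none => ("", "0", "")

def solution (files : List String) : List String :=
  let d : PySem.Dict String (List (String × Int × String × String)) :=
    files.foldl (fun d fn =>
      let p := parseD fn
      d.modify (PySem.Str.lower p.1) []
        (fun g => g ++ [(p.1, (PySem.Int.ofStr? p.2.1).getD 0, p.2.2, fn)])) PySem.Dict.empty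
  -- dict keys are pairwise distinct, so Python's sort of the (key, value) item tuples is a sort by key
  (PySem.List.sorted d.items (fun it => it.1)).foldl
    (fun answer it =>
      answer ++ (PySem.List.sorted it.2 (fun x => x.2.1)).map (fun v => v.2.2.2) ) []

-- ===== PORT B =====
-- Source B's first while loop: i advances past non-digit characters
def bHeadLen : List Char → Nat
  | [] => 0
  | c :: cs => if PySem.Chars.isdigit c then 0 else bHeadLen cs + 1

-- Source B's second while loop: j - i advances while within cap (= 5 - (j - i) left) over digits
def bNumLen : List Char → Nat → Nat
  | [], _ => 0
  | c :: cs, cap => if cap = 0 then 0 else if PySem.Chars.isdigit c then bNumLen cs (cap - 1) + 1 else 0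

-- body of Source B's for loop: the decorated triple (fn[:i].lower(), int(fn[i:j]), fn);
-- the getD 0 default is only reached outside Pre_solution, where int('') raises in Source B too.
def decorate (fn : String) : String × Int × String :=
  let cs := fn.toList
  let i := bHeadLen cs
  let rest := cs.drop i
  let j := bNumLen rest 5
  (PySem.Str.lower (String.ofList (cs.take i)),
   (PySem.Int.ofStr? (String.ofList (rest.take j))).getD 0, fn)

def solution_alt (files : List String) : List String :=
  (PySem.List.sorted2 (files.map decorate) (fun t => t.1) (fun t => t.2.1)).map (fun t => t.2.2)

-- ===== PRECONDITION & SPEC =====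
-- Pre_ excludes exactly the inputs on which the Python A raises: a file with no digit character makes
-- parse leave `rest` unbound (UnboundLocalError).  (Source B raises on the same inputs: int('') ValueError.)
def Pre_solution (files : List String) : Prop :=
  (files.all (fun s => s.toList.any (fun c => PySem.Chars.isdigit c))) = true
instance (files : List String) : Decidable (Pre_solution files) := by unfold Pre_solution; infer_instance

def pvWitness_solution : List String := ["img12.png", "IMG10.PNG", "foo010bar020.zip", "F-15"]

def Spec_solution (files : List String) (out : List String) : Prop := out = solution_alt files
instance (files : List String) (out : List String) : Decidable (Spec_solution files out) := by unfold Spec_solution; infer_instance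

-- ===== CLAIM (what is proved, stated in full; the proofs are below) =====
def Claim_equal_solution : Prop := ∀ (files : List String), Dom_solution files → Pre_solution files → Spec_solution files (solution files)

-- ===== LEMMAS AND PROOFS =====

-- head.lower() and int(number) of a filename under A's parse (canonical keys used by the proof)
def keyHead (fn : String) : String := PySem.Str.lower (parseD fn).1
def keyNum (fn : String) : Int := (PySem.Int.ofStr? (parseD fn).2.1).getD 0

def bf2 {α κ₁ κ₂ : Type} [LT κ₁] [DecidableLT κ₁] [LT κ₂] [DecidableLT κ₂]
    (k1 : α → κ₁) (k2 : α → κ₂) (a b : α) : Bool :=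
  decide (k1 a < k1 b) || (!decide (k1 b < k1 a) && decide (k2 a < k2 b))

theorem sorted2_eq_foldl {α κ₁ κ₂ : Type} [LT κ₁] [DecidableLT κ₁] [LT κ₂] [DecidableLT κ₂]
    (xs : List α) (k1 : α → κ₁) (k2 : α → κ₂) :
    PySem.List.sorted2 xs k1 k2 = xs.foldl (fun acc x => PySem.List.insertBy (bf2 k1 k2) x acc) [] := rfl

theorem insertBy_append_false {α : Type} (bf : α → α → Bool) (x : α) (l1 l2 : List α)
    (h : ∀ y ∈ l1, bf x y = false) :
    PySem.List.insertBy bf x (l1 ++ l2) = l1 ++ PySem.List.insertBy bf x l2 := by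
  induction l1 with
  | nil => rfl
  | cons y ys ih =>
    simp only [List.cons_append, PySem.List.insertBy, h y (by simp)]
    rw [ih (fun z hz => h z (by simp [hz]))]
    simp

theorem insertBy_congr_append {α : Type} (bf bf' : α → α → Bool) (x : α) (l1 l2 : List α)
    (h1 : ∀ y ∈ l1, bf x y = bf' x y) (h2 : ∀ y ∈ l2, bf x y = true) :
    PySem.List.insertBy bf x (l1 ++ l2) = PySem.List.insertBy bf' x l1 ++ l2 := by
  induction l1 with
  | nil =>
    cases l2 with
    | nil => rfl
    | cons z zs => simp only [List.nil_append, PySem.List.insertBy, h2 z (by simp)]; rfl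
  | cons y ys ih =>
    simp only [List.cons_append, PySem.List.insertBy, h1 y (by simp)]
    cases hb : bf' x y with
    | true => simp
    | false =>
      simp only [Bool.false_eq_true, if_false]
      rw [ih (fun z hz => h1 z (by simp [hz]))]
      simp

theorem insertBy_congr_mem {α : Type} (bf bf' : α → α → Bool) (x : α) (l : List α)
    (h : ∀ y ∈ l, bf x y = bf' x y) :
    PySem.List.insertBy bf x l = PySem.List.insertBy bf' x l := by
  induction l with
  | nil => rfl
  | cons y ys ih =>
    simp only [PySem.List.insertBy, h y (by simp)]
    rw [ih (fun z hz => h z (by simp [hz]))]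

theorem insertBy_map {α β : Type} (g : α → β) (bf : β → β → Bool) (x : α) (l : List α) :
    PySem.List.insertBy bf (g x) (l.map g) = (PySem.List.insertBy (fun a b => bf (g a) (g b)) x l).map g := by
  induction l with
  | nil => rfl
  | cons y ys ih =>
    simp only [List.map_cons, PySem.List.insertBy]
    by_cases hb : bf (g x) (g y) = true
    · simp [hb]
    · simp [hb, ih]

theorem sorted_map {α β κ : Type} [LT κ] [DecidableLT κ] (g : α → β) (key : β → κ) (l : List α) :
    PySem.List.sorted (l.map g) key = (PySem.List.sorted l (fun a => key (g a))).map g := by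
  rw [PySem.List.sorted_eq_foldl_insertBy, PySem.List.sorted_eq_foldl_insertBy, List.foldl_map]
  suffices h : ∀ acc : List α,
      l.foldl (fun acc x => PySem.List.insertBy (fun a b => decide (key a < key b)) (g x) acc) (acc.map g)
        = (l.foldl (fun acc x => PySem.List.insertBy (fun a b => decide (key (g a) < key (g b))) x acc) acc).map g by
    simpa using h []
  induction l with
  | nil => intro acc; rfl
  | cons y ys ih => intro acc; simp only [List.foldl_cons]; rw [insertBy_map g, ih]

theorem sorted2_map {α β κ₁ κ₂ : Type} [LT κ₁] [DecidableLT κ₁] [LT κ₂] [DecidableLT κ₂]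
    (g : α → β) (k1 : β → κ₁) (k2 : β → κ₂) (l : List α) :
    PySem.List.sorted2 (l.map g) k1 k2
      = (PySem.List.sorted2 l (fun a => k1 (g a)) (fun a => k2 (g a))).map g := by
  rw [sorted2_eq_foldl, sorted2_eq_foldl, List.foldl_map]
  suffices h : ∀ acc : List α,
      l.foldl (fun acc x => PySem.List.insertBy (bf2 k1 k2) (g x) acc) (acc.map g)
        = (l.foldl (fun acc x => PySem.List.insertBy (bf2 (fun a => k1 (g a)) (fun a => k2 (g a))) x acc) acc).map g by
    simpa using h []
  induction l with
  | nil => intro acc; rfl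
  | cons y ys ih =>
    intro acc; simp only [List.foldl_cons]; rw [insertBy_map g, ih]; rfl

theorem sorted_append_singleton {α κ : Type} [LT κ] [DecidableLT κ] (l : List α) (x : α) (key : α → κ) :
    PySem.List.sorted (l ++ [x]) key
      = PySem.List.insertBy (fun a b => decide (key a < key b)) x (PySem.List.sorted l key) := by
  rw [PySem.List.sorted_eq_foldl_insertBy, PySem.List.sorted_eq_foldl_insertBy, List.foldl_append]
  rfl

theorem sorted2_append_singleton {α κ₁ κ₂ : Type} [LT κ₁] [DecidableLT κ₁] [LT κ₂] [DecidableLT κ₂]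
    (l : List α) (x : α) (k1 : α → κ₁) (k2 : α → κ₂) :
    PySem.List.sorted2 (l ++ [x]) k1 k2
      = PySem.List.insertBy (bf2 k1 k2) x (PySem.List.sorted2 l k1 k2) := by
  rw [sorted2_eq_foldl, sorted2_eq_foldl, List.foldl_append]
  simp

theorem sorted2_congr_mem {α κ₁ κ₂ : Type} [LT κ₁] [DecidableLT κ₁] [LT κ₂] [DecidableLT κ₂]
    (l : List α) (k1 k1' : α → κ₁) (k2 k2' : α → κ₂)
    (h : ∀ x ∈ l, k1 x = k1' x ∧ k2 x = k2' x) :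
    PySem.List.sorted2 l k1 k2 = PySem.List.sorted2 l k1' k2' := by
  induction l using List.reverseRecOn with
  | nil => rfl
  | append_singleton xs x ih =>
    rw [sorted2_append_singleton, sorted2_append_singleton,
      ih (fun y hy => h y (by simp [hy]))]
    apply insertBy_congr_mem
    intro y hy
    have hy' : y ∈ xs := (PySem.List.sorted2_perm xs k1' k2' false).mem_iff.mp hy
    obtain ⟨hx1, hx2⟩ := h x (by simp)
    obtain ⟨hy1, hy2⟩ := h y (by simp [hy'])
    simp [bf2, hx1, hx2, hy1, hy2]

theorem flatMap_congr {α β : Type} (l : List α) (f g : α → List β) (h : ∀ a ∈ l, f a = g a) :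
    l.flatMap f = l.flatMap g := by
  simp only [List.flatMap_def]
  rw [List.map_congr_left h]

theorem bf2_of_lt {α κ₁ κ₂ : Type} [LinearOrder κ₁] [LT κ₂] [DecidableLT κ₂]
    (k1 : α → κ₁) (k2 : α → κ₂) {x y : α} (h : k1 x < k1 y) : bf2 k1 k2 x y = true := by
  simp [bf2, h]

theorem bf2_of_gt {α κ₁ κ₂ : Type} [LinearOrder κ₁] [LT κ₂] [DecidableLT κ₂]
    (k1 : α → κ₁) (k2 : α → κ₂) {x y : α} (h : k1 y < k1 x) : bf2 k1 k2 x y = false := by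
  simp [bf2, h, not_lt_of_gt h]

theorem bf2_of_eq {α κ₁ κ₂ : Type} [LinearOrder κ₁] [LT κ₂] [DecidableLT κ₂]
    (k1 : α → κ₁) (k2 : α → κ₂) {x y : α} (h : k1 y = k1 x) :
    bf2 k1 k2 x y = decide (k2 x < k2 y) := by
  simp [bf2, h]

theorem flatMap_exist {α κ₁ κ₂ : Type} [LinearOrder κ₁] [LinearOrder κ₂]
    (k1 : α → κ₁) (k2 : α → κ₂) (x : α) (ks : List κ₁) (G : κ₁ → List α)
    (hp : ks.Pairwise (· < ·))
    (hg : ∀ k ∈ ks, ∀ y ∈ G k, k1 y = k)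
    (hx : k1 x ∈ ks) :
    ks.flatMap (fun k => if k = k1 x
        then PySem.List.insertBy (fun a b => decide (k2 a < k2 b)) x (G k) else G k)
      = PySem.List.insertBy (bf2 k1 k2) x (ks.flatMap G) := by
  induction ks with
  | nil => simp at hx
  | cons k' ks' ih =>
    rcases List.pairwise_cons.mp hp with ⟨hlt', hp'⟩
    by_cases hk : k' = k1 x
    · have hcongr : ks'.flatMap (fun k => if k = k1 x
          then PySem.List.insertBy (fun a b => decide (k2 a < k2 b)) x (G k) else G k)
          = ks'.flatMap G := by
        apply flatMap_congr
        intro k hkmem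
        have : k ≠ k1 x := by
          intro he; exact absurd (hlt' k hkmem) (by rw [← hk] at he; rw [he]; exact lt_irrefl _)
        simp [this]
      rw [List.flatMap_cons, List.flatMap_cons, if_pos hk, hcongr]
      rw [insertBy_congr_append (bf2 k1 k2) (fun a b => decide (k2 a < k2 b)) x]
      · intro y hy
        exact bf2_of_eq k1 k2 (by rw [hg k' (by simp) y hy, hk])
      · intro y hy
        rcases List.mem_flatMap.mp hy with ⟨k, hkmem, hyG⟩
        refine bf2_of_lt k1 k2 ?_
        rw [hg k (by simp [hkmem]) y hyG, ← hk]
        exact hlt' k hkmem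
    · have hx' : k1 x ∈ ks' := by
        rcases List.mem_cons.mp hx with h | h
        · exact absurd h.symm hk
        · exact h
      rw [List.flatMap_cons, List.flatMap_cons, if_neg (fun he => hk he)]
      rw [insertBy_append_false (bf2 k1 k2) x]
      · rw [ih hp' (fun k hk y hy => hg k (by simp [hk]) y hy) hx']
      · intro y hy
        exact bf2_of_gt k1 k2 (by rw [hg k' (by simp) y hy]; exact hlt' _ hx')

theorem flatMap_fresh {α κ₁ κ₂ : Type} [LinearOrder κ₁] [LinearOrder κ₂]
    (k1 : α → κ₁) (k2 : α → κ₂) (x : α) (ks : List κ₁) (G : κ₁ → List α)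
    (hp : ks.Pairwise (· < ·))
    (hg : ∀ k ∈ ks, ∀ y ∈ G k, k1 y = k)
    (hx : k1 x ∉ ks)
    (hne : ∀ k ∈ ks, G k ≠ []) :
    (PySem.List.insertBy (fun a b => decide (a < b)) (k1 x) ks).flatMap
        (fun k => if k = k1 x then [x] else G k)
      = PySem.List.insertBy (bf2 k1 k2) x (ks.flatMap G) := by
  induction ks with
  | nil => simp [PySem.List.insertBy]
  | cons k' ks' ih =>
    rcases List.pairwise_cons.mp hp with ⟨hlt', hp'⟩
    have hk : k' ≠ k1 x := fun he => hx (by simp [he])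
    by_cases hlt : k1 x < k'
    · rcases List.ne_nil_iff_exists_cons.mp (hne k' (by simp)) with ⟨z, zs, hGz⟩
      have hbz : bf2 k1 k2 x z = true :=
        bf2_of_lt k1 k2 (by rw [hg k' (by simp) z (by simp [hGz])]; exact hlt)
      have hcongr : ks'.flatMap (fun k => if k = k1 x then [x] else G k) = ks'.flatMap G := by
        apply flatMap_congr
        intro k hkmem
        have : k ≠ k1 x := fun he => hx (by right; rw [← he]; exact hkmem)
        simp [this]
      simp only [PySem.List.insertBy, decide_eq_true_eq, if_pos hlt]
      rw [List.flatMap_cons, List.flatMap_cons, List.flatMap_cons, if_pos rfl,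
        if_neg (fun he => hk he), hcongr, hGz]
      simp [PySem.List.insertBy, hbz]
    · have hgt : k' < k1 x := lt_of_le_of_ne (not_lt.mp hlt) hk
      simp only [PySem.List.insertBy, decide_eq_true_eq, if_neg hlt]
      rw [List.flatMap_cons, List.flatMap_cons, if_neg (fun he => hk he)]
      rw [insertBy_append_false (bf2 k1 k2) x]
      · rw [ih hp' (fun k hkm y hy => hg k (by simp [hkm]) y hy)
          (fun he => hx (by simp [he])) (fun k hkm => hne k (by simp [hkm]))]
      · intro y hy
        exact bf2_of_gt k1 k2 (by rw [hg k' (by simp) y hy]; exact hgt)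

theorem set_ofList_append_singleton {κ : Type} [BEq κ] (l : List κ) (a : κ) :
    PySem.Set.ofList (l ++ [a]) = PySem.Set.add (PySem.Set.ofList l) a := by
  simp [PySem.Set.ofList, List.foldl_append]

theorem sorted_id_append_singleton {κ : Type} [LT κ] [DecidableLT κ] (l : List κ) (x : κ) :
    PySem.List.sorted (l ++ [x]) (fun k => k)
      = PySem.List.insertBy (fun a b => decide (a < b)) x (PySem.List.sorted l (fun k => k)) :=
  sorted_append_singleton l x (fun k => k)

theorem stable_group {α κ₁ κ₂ : Type} [LinearOrder κ₁] [LinearOrder κ₂] [BEq κ₁] [LawfulBEq κ₁]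
    (k1 : α → κ₁) (k2 : α → κ₂) (xs : List α) :
    (PySem.List.sorted (PySem.Set.ofList (xs.map k1)) (fun k => k)).flatMap
        (fun k => PySem.List.sorted (xs.filter (fun y => k1 y == k)) k2)
      = PySem.List.sorted2 xs k1 k2 := by
  induction xs using List.reverseRecOn with
  | nil => rfl
  | append_singleton xs x ih =>
    have hkeys := PySem.List.sorted_ofList_pairwise_lt (xs.map k1)
    have hg : ∀ k ∈ PySem.List.sorted (PySem.Set.ofList (xs.map k1)) (fun k => k),
        ∀ y ∈ PySem.List.sorted (xs.filter (fun y => k1 y == k)) k2, k1 y = k := by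
      intro k _ y hy
      have := List.of_mem_filter ((PySem.List.mem_sorted _ _ _ _).mp hy)
      exact eq_of_beq this
    rw [sorted2_append_singleton, ← ih, List.map_append, List.map_cons, List.map_nil,
      set_ofList_append_singleton]
    by_cases hmem : k1 x ∈ xs.map k1
    · have hc : PySem.Set.contains (PySem.Set.ofList (xs.map k1)) (k1 x) = true := by
        simp [PySem.Set.contains, (PySem.Set.mem_ofList _ _).mpr hmem]
      rw [PySem.Set.add, if_pos hc]
      rw [flatMap_congr _ _ (fun k => if k = k1 x
          then PySem.List.insertBy (fun a b => decide (k2 a < k2 b)) x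
            (PySem.List.sorted (xs.filter (fun y => k1 y == k)) k2)
          else PySem.List.sorted (xs.filter (fun y => k1 y == k)) k2) ?_]
      · exact flatMap_exist k1 k2 x _ _ hkeys hg
          ((PySem.List.mem_sorted _ _ _ _).mpr ((PySem.Set.mem_ofList _ _).mpr hmem))
      · intro k _
        beta_reduce
        by_cases hk : k = k1 x
        · rw [if_pos hk, List.filter_append]
          have : List.filter (fun y => k1 y == k) [x] = [x] := by simp [hk]
          rw [this, sorted_append_singleton]
        · rw [if_neg hk, List.filter_append]
          have : List.filter (fun y => k1 y == k) [x] = [] := by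
            simp; exact fun he => hk he.symm
          rw [this, List.append_nil]
    · have hc : PySem.Set.contains (PySem.Set.ofList (xs.map k1)) (k1 x) = false := by
        simp [PySem.Set.contains]
        intro y hy he
        exact hmem (he ▸ List.mem_map_of_mem hy)
      rw [PySem.Set.add, if_neg (ne_true_of_eq_false hc), sorted_id_append_singleton]
      rw [flatMap_congr _ _ (fun k => if k = k1 x then [x]
          else PySem.List.sorted (xs.filter (fun y => k1 y == k)) k2) ?_]
      · exact flatMap_fresh k1 k2 x _ _ hkeys hg
          (fun hmm => hmem ((PySem.Set.mem_ofList _ _).mp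
            ((PySem.List.mem_sorted _ _ _ _).mp hmm)))
          (by
            intro k hkm
            have hkm' := (PySem.Set.mem_ofList _ _).mp ((PySem.List.mem_sorted _ _ _ _).mp hkm)
            rcases List.mem_map.mp hkm' with ⟨y, hymem, hyk⟩
            rw [Ne, PySem.List.sorted_eq_nil_iff, List.filter_eq_nil_iff]
            push Not
            exact ⟨y, hymem, by simp [hyk]⟩)
      · intro k hkm
        beta_reduce
        rcases (PySem.List.mem_insertBy _ _ _ _).mp hkm with hk | hk
        · rw [if_pos hk, List.filter_append]
          have h1 : List.filter (fun y => k1 y == k) xs = [] := by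
            rw [List.filter_eq_nil_iff]
            intro y hymem
            simp [hk]
            exact fun he => hmem (he ▸ List.mem_map_of_mem hymem)
          have h2 : List.filter (fun y => k1 y == k) [x] = [x] := by simp [hk]
          rw [h1, h2]; rfl
        · have hne : k ≠ k1 x := by
            intro he
            exact hmem ((PySem.Set.mem_ofList _ _).mp
              ((PySem.List.mem_sorted _ _ _ _).mp (he ▸ hk)))
          rw [if_neg hne, List.filter_append]
          have : List.filter (fun y => k1 y == k) [x] = [] := by
            simp; exact fun he => hne he.symm
          rw [this, List.append_nil]

def entry (fn : String) : String × Int × String × String :=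
  ((parseD fn).1, keyNum fn, (parseD fn).2.2, fn)

theorem dict_group (files : List String) (c : String) :
    ((files.foldl (fun d fn =>
        let p := parseD fn
        d.modify (PySem.Str.lower p.1) []
          (fun g => g ++ [(p.1, (PySem.Int.ofStr? p.2.1).getD 0, p.2.2, fn)])) PySem.Dict.empty).getD c [])
      = (files.filter (fun fn => keyHead fn == c)).map entry := by
  have h := PySem.Dict.getD_foldl_modify_append
    (files.map (fun fn => (keyHead fn, entry fn))) PySem.Dict.empty c
  rw [List.foldl_map] at h
  simpa [keyHead, entry, keyNum, List.filter_map, List.map_map, Function.comp] using h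

theorem solution_eq_canon (files : List String) :
    solution files
      = (PySem.List.sorted (PySem.Set.ofList (files.map keyHead)) (fun k => k)).flatMap
          (fun k => PySem.List.sorted (files.filter (fun fn => keyHead fn == k)) keyNum) := by
  unfold solution
  have hfun : (fun (d : PySem.Dict String (List (String × Int × String × String))) fn =>
      let p := parseD fn
      d.modify (PySem.Str.lower p.1) []
        (fun g => g ++ [(p.1, (PySem.Int.ofStr? p.2.1).getD 0, p.2.2, fn)]))
      = (fun d fn => d.modify (keyHead fn) [] (fun g => g ++ [entry fn])) := rfl
  rw [hfun]
  show List.foldl (fun answer it =>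
      answer ++ List.map (fun v => v.2.2.2) (PySem.List.sorted it.2 fun x => x.2.1)) []
      (PySem.List.sorted (List.foldl (fun d fn =>
        d.modify (keyHead fn) [] fun g => g ++ [entry fn]) PySem.Dict.empty files).items
        fun it => it.1) = _
  set D := files.foldl (fun d fn => d.modify (keyHead fn) [] (fun g => g ++ [entry fn]))
    PySem.Dict.empty with hD
  have hkeys : D.keys = PySem.Set.ofList (files.map keyHead) := by
    have h := PySem.Dict.keys_foldl_modify_key files keyHead []
      (fun _ fn => fun g => g ++ [entry fn]) PySem.Dict.empty
    simpa [PySem.Set.update, PySem.Set.ofList] using h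
  have hnodup : D.keys.Nodup := by
    exact PySem.Dict.nodup_keys_foldl_modify_key files keyHead []
      (fun _ fn => fun g => g ++ [entry fn]) PySem.Dict.empty PySem.Dict.nodup_keys_empty
  have hitems : D.items = D.keys.map (fun k => (k, D.getD k [])) :=
    PySem.Dict.items_eq_map_keys D hnodup []
  rw [hitems, hkeys, sorted_map]
  rw [PySem.List.foldl_append_eq_flatMap]
  rw [List.flatMap_map]
  rw [List.nil_append]
  have hgrp : ∀ c, D.getD c [] = (files.filter (fun fn => keyHead fn == c)).map entry := by
    intro c; rw [hD]; exact dict_group files c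
  apply flatMap_congr
  intro k _
  simp only [hgrp k, sorted_map, List.map_map]
  have h1 : (fun a => (entry a).2.1) = keyNum := rfl
  have h2 : ((fun v : String × Int × String × String => v.2.2.2) ∘ entry) = id := rfl
  rw [h1, h2, List.map_id]

-- ===== B's scanner equals A's parse on strings containing a digit =====

theorem findIdx_digit (cs : List Char) (h : cs.any (fun c => PySem.Chars.isdigit c) = true) :
    cs.findIdx? PySem.Chars.isdigit = some (bHeadLen cs)
    ∧ ∃ c cs', cs.drop (bHeadLen cs) = c :: cs' ∧ PySem.Chars.isdigit c = true := by
  induction cs with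
  | nil => simp at h
  | cons c cs ih =>
    by_cases hd : PySem.Chars.isdigit c = true
    · refine ⟨?_, c, cs, ?_, hd⟩ <;> simp [bHeadLen, hd, List.findIdx?_cons]
    · have h' : cs.any (fun c => PySem.Chars.isdigit c) = true := by
        simpa [hd] using h
      obtain ⟨h1, c', cs', h2, h3⟩ := ih h'
      refine ⟨?_, c', cs', ?_, h3⟩
      · simp [List.findIdx?_cons, hd, bHeadLen, h1]
      · simp [bHeadLen, hd, h2]

theorem loop2_bNum (rest : List Char) (i : Nat) (hi : i ≤ 5) :
    parseLoop2 rest i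
      = if bNumLen rest (5 - i) = rest.length then none else some (i + bNumLen rest (5 - i)) := by
  induction rest generalizing i with
  | nil => simp [parseLoop2, bNumLen]
  | cons c cs ih =>
    by_cases h5 : i > 4
    · have hi5 : i = 5 := by omega
      subst hi5
      simp [parseLoop2, bNumLen]
    · have hcap : 5 - i ≠ 0 := by omega
      by_cases hd : PySem.Chars.isdigit c = true
      · have hrec := ih (i + 1) (by omega)
        have hc' : 5 - (i + 1) = 5 - i - 1 := by omega
        rw [hc'] at hrec
        have hbn : bNumLen (c :: cs) (5 - i) = bNumLen cs (5 - i - 1) + 1 := by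
          simp [bNumLen, hcap, hd]
        have hpl : parseLoop2 (c :: cs) i = parseLoop2 cs (i + 1) := by
          simp [parseLoop2, hd, h5]
        rw [hpl, hbn, hrec, List.length_cons]
        by_cases he : bNumLen cs (5 - i - 1) = cs.length
        · simp [he]
        · have h2 : ¬ (bNumLen cs (5 - i - 1) + 1 = cs.length + 1) := by omega
          simp [he]
          omega
      · have : (decide (i > 4) || !PySem.Chars.isdigit c) = true := by simp [hd]
        simp only [parseLoop2, bNumLen, if_neg hcap, hd]
        simp

theorem decorate_eq (fn : String) (h : fn.toList.any (fun c => PySem.Chars.isdigit c) = true) :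
    decorate fn = (keyHead fn, keyNum fn, fn) := by
  obtain ⟨h1, c, cs', h2, h3⟩ := findIdx_digit fn.toList h
  have hloop := loop2_bNum (fn.toList.drop (bHeadLen fn.toList)) 0 (by omega)
  simp only [Nat.sub_zero, Nat.zero_add] at hloop
  have hpos : 0 < bNumLen (fn.toList.drop (bHeadLen fn.toList)) 5 := by
    rw [h2]
    simp [bNumLen, h3]
  unfold decorate keyHead keyNum parseD parseChars
  rw [h1]
  simp only
  by_cases he : bNumLen (fn.toList.drop (bHeadLen fn.toList)) 5
      = (fn.toList.drop (bHeadLen fn.toList)).length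
  · rw [hloop, if_pos he]
    simp only
    rw [he, List.take_length]
  · rw [hloop, if_neg he]
    simp only
    have hne : (fn.toList.drop (bHeadLen fn.toList)).take
        (bNumLen (fn.toList.drop (bHeadLen fn.toList)) 5) ≠ [] := by
      rw [Ne, List.take_eq_nil_iff]
      push Not
      constructor
      · omega
      · rw [Ne, ← List.length_eq_zero_iff]
        rw [h2]; simp
    rw [if_neg hne]

theorem solution_alt_eq_canon (files : List String)
    (h : ∀ fn ∈ files, fn.toList.any (fun c => PySem.Chars.isdigit c) = true) :
    solution_alt files = PySem.List.sorted2 files keyHead keyNum := by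
  unfold solution_alt
  rw [sorted2_map]
  rw [List.map_map]
  have hp : ((fun t : String × Int × String => t.2.2) ∘ decorate) = id := rfl
  rw [hp, List.map_id]
  apply sorted2_congr_mem
  intro fn hfn
  rw [decorate_eq fn (h fn hfn)]
  exact ⟨rfl, rfl⟩

-- ===== VERDICT (by name: the statement is the Claim_ definition above) =====
theorem solution_spec : Claim_equal_solution := by
  intro files _ hpre
  unfold Spec_solution
  rw [solution_alt_eq_canon files (by
    intro fn hfn
    exact List.all_eq_true.mp hpre fn hfn)]
  rw [solution_eq_canon, stable_group]
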